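-- pv_equiv track=rewrite | github.com/smt2466/codewars | python3/kyu_6/bracket_duplicates.py | string_parse
-- ===== SOURCE A (Python) =====
-- def string_parse(string):
--     """Enclose duplicated letters after second into brackets"""
--     result = ''
--     count = 0
--     brackets = False
--
--     for i, letter in enumerate(string):
--         if i == 0:
--             count += 1
--             result += letter
--         elif letter == string[i-1]:
--             count += 1
--             if count == 3:
--                 result += '[' + letter
--                 brackets = True
--             else:
--                 result += letter
--         else:
--             if count > 2:
--                 result += ']'
--                 brackets = False
--             result += letter
--             count = 1
--     if brackets:
--         result += ']'
--     return result
-- ===== SOURCE B (Python) =====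
-- def string_parse(string):
--     """Enclose duplicated letters after second into brackets"""
--     runs = []
--     for c in string:
--         if runs and runs[-1][0] == c:
--             runs[-1][1] += 1
--         else:
--             runs.append([c, 1])
--     return ''.join(c * k if k < 3 else c * 2 + '[' + c * (k - 2) + ']'
--                    for c, k in runs)
-- ===== Notes on version B (the rewrite author's own statement) =====
-- stated objective: idiomatic
-- what changed: Replaced the index-based state machine (running count and brackets flag, lookback at string[i-1]) by a group-then-format pass: first collect maximal runs of equal characters, then render each run independently and join.
import Mathlib
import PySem

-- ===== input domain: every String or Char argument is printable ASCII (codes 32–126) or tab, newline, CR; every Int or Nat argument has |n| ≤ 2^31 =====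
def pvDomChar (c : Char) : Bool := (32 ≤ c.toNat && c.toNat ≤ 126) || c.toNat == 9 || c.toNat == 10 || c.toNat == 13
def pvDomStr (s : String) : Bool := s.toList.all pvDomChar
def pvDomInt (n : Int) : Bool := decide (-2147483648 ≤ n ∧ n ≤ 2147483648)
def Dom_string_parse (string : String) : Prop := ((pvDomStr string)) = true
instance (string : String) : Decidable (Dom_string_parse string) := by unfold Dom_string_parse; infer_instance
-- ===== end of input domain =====

-- B replaces A's index-based state machine (count + brackets flag) by group-then-format: collect maximal runs, render each; objective: idiomatic.

-- ===== PORT A =====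
-- loop body of A's 'for i, letter in enumerate(string)': state (result, count, brackets)
def pvStepA (s : List Char) (st : List Char × Int × Bool) (p : Int × Char) : List Char × Int × Bool :=
  let result := st.1
  let count := st.2.1
  let brackets := st.2.2
  let i := p.1
  let letter := p.2
  if i == 0 then (result ++ [letter], count + 1, brackets)
  else if PySem.List.pyGet? s (i - 1) == some letter then
    let count := count + 1
    if count == 3 then (result ++ ['[', letter], count, true)
    else (result ++ [letter], count, brackets)
  else
    let rb := if count > 2 then (result ++ [']'], false) else (result, brackets)
    (rb.1 ++ [letter], 1, rb.2)

def string_parse (string : String) : String :=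
  let s := string.toList
  let st := (PySem.List.enumerate s).foldl (pvStepA s) ([], 0, false)
  String.ofList (if st.2.2 then st.1 ++ [']'] else st.1)

-- ===== PORT B =====
-- loop body of B's run collector: extend the last run or start a new one
def pvStepB (runs : List (Char × Nat)) (c : Char) : List (Char × Nat) :=
  match runs.getLast? with
  | some q => if q.1 == c then runs.dropLast ++ [(q.1, q.2 + 1)] else runs ++ [(c, 1)]
  | none => runs ++ [(c, 1)]

-- render one run: c*k, or c*2 + '[' + c*(k-2) + ']'
def pvFmtRun (p : Char × Nat) : List Char :=
  if p.2 < 3 then List.replicate p.2 p.1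
  else List.replicate 2 p.1 ++ '[' :: (List.replicate (p.2 - 2) p.1 ++ [']'])

def string_parse_alt (string : String) : String :=
  let runs := string.toList.foldl pvStepB []
  String.ofList (runs.flatMap pvFmtRun)

-- ===== PRECONDITION & SPEC =====
def Spec_string_parse (string : String) (out : String) : Prop := out = string_parse_alt string
instance (string : String) (out : String) : Decidable (Spec_string_parse string out) := by unfold Spec_string_parse; infer_instance

-- ===== CLAIM (what is proved, stated in full; the proofs are below) =====
def Claim_equal_string_parse : Prop := ∀ (string : String), Dom_string_parse string → Spec_string_parse string (string_parse string)

-- ===== LEMMAS AND PROOFS =====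

-- A's loop, rephrased as structural recursion carrying the previous character
def pvGoA : Option Char → List Char × Int × Bool → List Char → List Char × Int × Bool
  | _, st, [] => st
  | prev, st, c :: t =>
    let st' : List Char × Int × Bool :=
      match prev with
      | none => (st.1 ++ [c], st.2.1 + 1, st.2.2)
      | some p =>
        if p == c then
          if st.2.1 + 1 == 3 then (st.1 ++ ['[', c], st.2.1 + 1, true)
          else (st.1 ++ [c], st.2.1 + 1, st.2.2)
        else
          let rb := if st.2.1 > 2 then (st.1 ++ [']'], false) else (st.1, st.2.2)
          (rb.1 ++ [c], 1, rb.2)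
    pvGoA (some c) st' t

-- the rendering of a still-open run (closing ']' not yet emitted)
def pvPartial (c : Char) (k : Nat) : List Char :=
  if k < 3 then List.replicate k c
  else List.replicate 2 c ++ '[' :: List.replicate (k - 2) c

def pvFin (st : List Char × Int × Bool) : List Char :=
  if st.2.2 then st.1 ++ [']'] else st.1

theorem pvPartial_close (c : Char) (k : Nat) :
    (if 3 ≤ k then pvPartial c k ++ [']'] else pvPartial c k) = pvFmtRun (c, k) := by
  by_cases h : k < 3
  · have h' : ¬ 3 ≤ k := by omega
    simp [pvPartial, pvFmtRun, h, h']
  · have h' : 3 ≤ k := by omega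
    simp [pvPartial, pvFmtRun, h, h']

theorem pvPartial_snoc (c : Char) (k : Nat) (h1 : 1 ≤ k) (h2 : k ≠ 2) :
    pvPartial c k ++ [c] = pvPartial c (k + 1) := by
  by_cases h : k < 3
  · have : k = 1 := by omega
    subst this
    simp [pvPartial, List.replicate]
  · have h3 : ¬ k + 1 < 3 := by omega
    have e : k + 1 - 2 = (k - 2) + 1 := by omega
    simp [pvPartial, h, h3, e, List.replicate_succ']

-- index elimination: A's enumerate/lookback fold equals pvGoA
theorem pvA_go (t : List Char) : ∀ (pre : List Char) (st : List Char × Int × Bool),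
    (PySem.List.enumerate t (pre.length : Int)).foldl (pvStepA (pre ++ t)) st
      = pvGoA pre.getLast? st t := by
  induction t with
  | nil => intro pre st; simp [pvGoA, PySem.List.enumerate_nil]
  | cons c t ih =>
    intro pre st
    rw [PySem.List.enumerate_cons, List.foldl_cons]
    have hih := ih (pre ++ [c]) (pvStepA (pre ++ c :: t) st ((pre.length : Int), c))
    rw [show ((pre ++ [c]).length : Int) = (pre.length : Int) + 1 by simp,
        show (pre ++ [c]) ++ t = pre ++ c :: t by simp, List.getLast?_concat] at hih
    rw [hih]
    rcases pre.eq_nil_or_concat with rfl | ⟨l, p, rfl⟩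
    · simp only [List.getLast?_nil, pvGoA]
      congr 1
    · simp only [List.concat_eq_append] at *
      rw [List.getLast?_concat]
      simp only [pvGoA]
      congr 1
      have hne : ((((l ++ [p]).length : Nat) : Int) == 0) = false := by
        simp only [List.length_append, List.length_cons, List.length_nil,
          beq_eq_false_iff_ne, ne_eq]
        push_cast
        omega
      have hidx : (((l ++ [p]).length : Nat) : Int) - 1 = (l.length : Int) := by
        simp
      have hget : PySem.List.pyGet? ((l ++ [p]) ++ c :: t) ((l.length : Int))
          = some p := by
        rw [show (l ++ [p]) ++ c :: t = l ++ p :: (c :: t) by simp]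
        exact PySem.List.pyGet?_append_length l (c :: t) p
      simp only [pvStepA, hne, hidx, hget, Bool.false_eq_true, if_false,
        Option.some.injEq, beq_iff_eq]

-- main coupled invariant: A's machine vs B's run list
theorem pvMain (t : List Char) : ∀ (rs : List (Char × Nat)) (c : Char) (k : Nat), 1 ≤ k →
    pvFin (pvGoA (some c) (rs.flatMap pvFmtRun ++ pvPartial c k, (k : Int), decide (3 ≤ k)) t)
      = (t.foldl pvStepB (rs ++ [(c, k)])).flatMap pvFmtRun := by
  induction t with
  | nil =>
    intro rs c k hk
    simp only [pvGoA, pvFin, List.foldl_nil, List.flatMap_append]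
    have := pvPartial_close c k
    by_cases h : 3 ≤ k <;> simp [h] at this ⊢ <;> simp [this]
  | cons c' t ih =>
    intro rs c k hk
    rw [List.foldl_cons]
    by_cases hcc : c = c'
    · subst hcc
      simp only [pvStepB, List.getLast?_concat, beq_self_eq_true, if_true,
        List.dropLast_concat]
      by_cases hk2 : k = 2
      · subst hk2
        have h3 : ((2 : Nat) : Int) + 1 == 3 := by decide
        simp only [pvGoA, h3, if_true, beq_self_eq_true]
        have hpar : (rs.flatMap pvFmtRun ++ pvPartial c 2) ++ ['[', c]
            = rs.flatMap pvFmtRun ++ pvPartial c 3 := by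
          simp [pvPartial, List.replicate]
        have := ih rs c 3 (by omega)
        rw [show ((3:Nat):Int) = ((2:Nat):Int) + 1 by decide] at this
        rw [show (decide (3 ≤ 3)) = true by decide] at this
        rw [← this, hpar]
      · have h3 : (((k : Nat) : Int) + 1 == 3) = false := by
          simp
          omega
        have hb : decide (3 ≤ k) = decide (3 ≤ k + 1) :=
          decide_eq_decide.mpr (by omega)
        have hih := ih rs c (k + 1) (by omega)
        rw [show ((k+1:Nat):Int) = ((k:Nat):Int) + 1 by push_cast; ring] at hih
        rw [← hih]
        simp only [pvGoA, beq_self_eq_true, if_true, h3, Bool.false_eq_true,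
          if_false, hb, List.append_assoc, pvPartial_snoc c k hk hk2]
    · have hbe : (c == c') = false := by simp [hcc]
      have hih := ih (rs ++ [(c, k)]) c' 1 (by omega)
      rw [show ((1:Nat):Int) = 1 by decide,
          show (decide (3 ≤ 1)) = false by decide] at hih
      have hstB : pvStepB (rs ++ [(c, k)]) c' = (rs ++ [(c, k)]) ++ [(c', 1)] := by
        simp [pvStepB, hbe]
      rw [hstB, ← hih]
      have hstate : (rs.flatMap pvFmtRun ++ pvFmtRun (c, k)) ++ [c']
          = (rs ++ [(c, k)]).flatMap pvFmtRun ++ pvPartial c' 1 := by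
        simp [List.flatMap_append, pvPartial, List.replicate]
      by_cases h : 3 ≤ k
      · have hcl := pvPartial_close c k
        rw [if_pos h] at hcl
        have hgt : ((k : Nat) : Int) > 2 := by omega
        simp only [pvGoA, hbe, Bool.false_eq_true, if_false, if_pos hgt]
        rw [show rs.flatMap pvFmtRun ++ pvPartial c k ++ [']']
              = rs.flatMap pvFmtRun ++ pvFmtRun (c, k) by
            rw [List.append_assoc, hcl], hstate]
      · have hcl := pvPartial_close c k
        rw [if_neg h] at hcl
        have hgt : ¬ ((k : Nat) : Int) > 2 := by omega
        have hd : decide (3 ≤ k) = false := by simp [h]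
        simp only [pvGoA, hbe, Bool.false_eq_true, if_false, if_neg hgt, hd]
        rw [show rs.flatMap pvFmtRun ++ pvPartial c k
              = rs.flatMap pvFmtRun ++ pvFmtRun (c, k) by rw [hcl], hstate]

theorem pvStart (t : List Char) :
    pvFin (pvGoA none ([], 0, false) t) = (t.foldl pvStepB []).flatMap pvFmtRun := by
  cases t with
  | nil => rfl
  | cons c t =>
    have h := pvMain t [] c 1 (by omega)
    simpa [pvGoA, pvStepB, pvPartial] using h

-- ===== VERDICT (by name: the statement is the Claim_ definition above) =====
theorem string_parse_spec : Claim_equal_string_parse := by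
  unfold Claim_equal_string_parse Spec_string_parse
  intro s _
  simp only [string_parse, string_parse_alt]
  have h1 := pvA_go s.toList [] ([], 0, false)
  simp only [List.length_nil, Nat.cast_zero, List.nil_append, List.getLast?_nil] at h1
  rw [h1]
  have h2 := pvStart s.toList
  simp only [pvFin] at h2
  rw [h2]
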